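-- pv_equiv track=rewrite | github.com/LURKS02/algorithm | algorithm/골드/골드2/2632.py | findPizza
-- ===== SOURCE A (Python) =====
-- from collections import defaultdict
--
-- def findPizza(pizza):
--     case = defaultdict(int)
--     length = len(pizza)
--
--     for i in range(length):
--         temp = pizza[i:] + pizza[:i]
--         pre = 0
--         for num in temp:
--             pre += num
--             case[pre] += 1
--     case[sum(pizza)] = 1
--     return case
-- ===== SOURCE B (Python) =====
-- from collections import defaultdict
-- from itertools import accumulate
--
-- def findPizza(pizza):
--     n = len(pizza)
--     P = [0] + list(accumulate(pizza + pizza))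
--     case = defaultdict(int)
--     for i in range(n):
--         for l in range(1, n + 1):
--             case[P[i + l] - P[i]] += 1
--     case[sum(pizza)] = 1
--     return case
-- ===== Notes on version B (the rewrite author's own statement) =====
-- stated objective: alternative
-- what changed: Replaced the per-start rotated-slice rebuild with a running accumulator by a single prefix-sum table over the doubled list, computing each circular segment sum as P[i+l]-P[i] by index arithmetic.
import Mathlib
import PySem

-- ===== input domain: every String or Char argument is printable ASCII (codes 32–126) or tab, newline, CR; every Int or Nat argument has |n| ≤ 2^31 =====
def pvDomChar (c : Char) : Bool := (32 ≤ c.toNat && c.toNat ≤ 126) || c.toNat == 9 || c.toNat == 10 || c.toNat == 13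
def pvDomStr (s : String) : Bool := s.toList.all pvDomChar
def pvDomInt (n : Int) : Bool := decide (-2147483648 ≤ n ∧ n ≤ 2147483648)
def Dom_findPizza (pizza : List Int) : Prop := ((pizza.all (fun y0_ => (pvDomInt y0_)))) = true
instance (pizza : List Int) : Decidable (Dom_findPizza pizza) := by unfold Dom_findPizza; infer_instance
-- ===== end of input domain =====

-- B replaces A's per-start rotated-slice rebuild and running accumulator by one prefix-sum
-- table over the doubled list, indexed arithmetically (objective: alternative; same asymptotic cost).


-- ===== PORT A =====
-- defaultdict(int) with 'case[k] += 1' is Dict.modify k 0 (· + 1); the returned dict is its items list.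
def findPizza (pizza : List Int) : List (Int × Int) :=
  let length : Int := pizza.length
  let case : PySem.Dict Int Int :=
    (PySem.List.pyRange 0 length 1).foldl (fun case i =>
      let temp := PySem.List.slice pizza (some i) none ++ PySem.List.slice pizza none (some i)
      (temp.foldl (fun (st : Int × PySem.Dict Int Int) num =>
          (st.1 + num, st.2.modify (st.1 + num) 0 (· + 1))) ((0 : Int), case)).2)
      PySem.Dict.empty
  (case.insert pizza.sum 1).items

-- ===== PORT B =====
-- itertools.accumulate over the doubled list (running prefix sums)
def pvAccumulate : Int → List Int → List Int
  | _, [] => []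
  | p, x :: xs => (p + x) :: pvAccumulate (p + x) xs

-- P[i] is always in range (i + l ≤ 2n < |P|), so pyGetD with default 0 is exact Python indexing here.
def findPizza_alt (pizza : List Int) : List (Int × Int) :=
  let n : Int := pizza.length
  let P : List Int := 0 :: pvAccumulate 0 (pizza ++ pizza)
  let case : PySem.Dict Int Int :=
    (PySem.List.pyRange 0 n 1).foldl (fun case i =>
      (PySem.List.pyRange 1 (n + 1) 1).foldl (fun case l =>
        case.modify (PySem.List.pyGetD P (i + l) 0 - PySem.List.pyGetD P i 0) 0 (· + 1)) case)
      PySem.Dict.empty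
  (case.insert pizza.sum 1).items

-- ===== PRECONDITION & SPEC =====
def Spec_findPizza (pizza : List Int) (out : List (Int × Int)) : Prop := out = findPizza_alt pizza
instance (pizza : List Int) (out : List (Int × Int)) : Decidable (Spec_findPizza pizza out) := by unfold Spec_findPizza; infer_instance

-- ===== CLAIM (what is proved, stated in full; the proofs are below) =====
def Claim_equal_findPizza : Prop := ∀ (pizza : List Int), Dom_findPizza pizza → Spec_findPizza pizza (findPizza pizza)

-- ===== LEMMAS AND PROOFS =====

-- A's inner accumulator loop counts exactly the running prefix sums of temp.
theorem innerA_eq (temp : List Int) (p : Int) (case : PySem.Dict Int Int) :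
    (temp.foldl (fun (st : Int × PySem.Dict Int Int) num =>
        (st.1 + num, st.2.modify (st.1 + num) 0 (· + 1))) (p, case)).2
      = (pvAccumulate p temp).foldl (fun c k => c.modify k 0 (· + 1)) case := by
  induction temp generalizing p case with
  | nil => rfl
  | cons x xs ih => simp [pvAccumulate, List.foldl_cons, ih]

theorem length_pvAccumulate (p : Int) (ys : List Int) :
    (pvAccumulate p ys).length = ys.length := by
  induction ys generalizing p with
  | nil => rfl
  | cons x xs ih => simp [pvAccumulate, ih]

theorem getElem_pvAccumulate (p : Int) (ys : List Int) (k : Nat) (hk : k < ys.length) :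
    (pvAccumulate p ys)[k]'(by rw [length_pvAccumulate]; exact hk)
      = p + (ys.take (k + 1)).sum := by
  induction ys generalizing p k with
  | nil => simp at hk
  | cons x xs ih =>
    cases k with
    | zero => simp [pvAccumulate]
    | succ k =>
      simp only [pvAccumulate, List.getElem_cons_succ, List.take_succ_cons, List.sum_cons]
      rw [ih (p + x) k (by simpa using hk)]
      ring

-- P-table entry m (0 ≤ m ≤ |ys|) is the sum of the first m elements of ys.
theorem P_getElem (ys : List Int) (m : Nat) (hm : m ≤ ys.length) :
    (0 :: pvAccumulate 0 ys)[m]'(by simp [length_pvAccumulate]; omega)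
      = (ys.take m).sum := by
  cases m with
  | zero => simp
  | succ m =>
    simp only [List.getElem_cons_succ]
    rw [getElem_pvAccumulate 0 ys m (by omega)]
    simp

-- the per-start key lists agree: prefix sums of the rotation = differences of the P table
theorem keys_eq (pizza : List Int) (i : Int) (h0 : 0 ≤ i) (hi : i < (pizza.length : Int)) :
    (PySem.List.pyRange 1 ((pizza.length : Int) + 1) 1).map
        (fun l => PySem.List.pyGetD (0 :: pvAccumulate 0 (pizza ++ pizza)) (i + l) 0
                 - PySem.List.pyGetD (0 :: pvAccumulate 0 (pizza ++ pizza)) i 0)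
      = pvAccumulate 0 (PySem.List.slice pizza (some i) none ++ PySem.List.slice pizza none (some i)) := by
  set n := pizza.length with hn
  obtain ⟨j, rfl⟩ : ∃ j : Nat, i = (j : Int) := ⟨i.toNat, (Int.toNat_of_nonneg h0).symm⟩
  have hj : j < n := by exact_mod_cast hi
  have hslice : PySem.List.slice pizza (some (j : Int)) none ++ PySem.List.slice pizza none (some (j : Int))
      = pizza.drop j ++ pizza.take j := by
    rw [PySem.List.slice_from_natCast, PySem.List.slice_to_natCast]
  rw [hslice]
  have hlenys : (pizza ++ pizza).length = 2 * n := by simp [hn]; omega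
  apply List.ext_getElem
  · simp [length_pvAccumulate, PySem.List.length_pyRange_one]
    omega
  · intro k hk1 hk2
    have hk : k < n := by
      simp [length_pvAccumulate] at hk2
      omega
    rw [List.getElem_map]
    rw [PySem.List.getElem_pyRange_one]
    -- index arithmetic: both lookups are in range
    have hPk : ((j : Int) + (1 + (k : Int))) = ((j + k + 1 : Nat) : Int) := by push_cast; ring
    rw [hPk]
    rw [PySem.List.pyGetD_natCast, PySem.List.pyGetD_natCast]
    rw [List.getD_eq_getElem _ _ (by simp [length_pvAccumulate, hlenys]; omega)]
    rw [List.getD_eq_getElem _ _ (by simp [length_pvAccumulate, hlenys]; omega)]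
    rw [P_getElem _ _ (by omega), P_getElem _ _ (by omega)]
    rw [getElem_pvAccumulate 0 _ k (by simp; omega)]
    -- take (j+k+1) ys = take j ys ++ take (k+1) (drop j ys)
    have hsplit : (pizza ++ pizza).take (j + k + 1)
        = (pizza ++ pizza).take j ++ ((pizza ++ pizza).drop j).take (k + 1) := by
      have h1 : j + k + 1 = j + (k + 1) := by omega
      rw [h1, List.take_add]
    rw [hsplit, List.sum_append]
    have hdrop : (pizza ++ pizza).drop j = pizza.drop j ++ pizza := by
      rw [List.drop_append]
      have : j - pizza.length = 0 := by omega
      simp [this]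
    have htake : ((pizza ++ pizza).drop j).take (k + 1)
        = (pizza.drop j ++ pizza.take j).take (k + 1) := by
      rw [hdrop, List.take_append, List.take_append]
      congr 1
      rw [List.take_take]
      congr 1
      simp
      omega
    rw [htake]
    ring

-- the outer loops build the same dict
theorem cases_eq (pizza : List Int) :
    (PySem.List.pyRange 0 (pizza.length : Int) 1).foldl (fun case i =>
        let temp := PySem.List.slice pizza (some i) none ++ PySem.List.slice pizza none (some i)
        (temp.foldl (fun (st : Int × PySem.Dict Int Int) num =>
            (st.1 + num, st.2.modify (st.1 + num) 0 (· + 1))) ((0 : Int), case)).2)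
      PySem.Dict.empty
    = (PySem.List.pyRange 0 (pizza.length : Int) 1).foldl (fun case i =>
        (PySem.List.pyRange 1 ((pizza.length : Int) + 1) 1).foldl (fun case l =>
          case.modify (PySem.List.pyGetD (0 :: pvAccumulate 0 (pizza ++ pizza)) (i + l) 0
                      - PySem.List.pyGetD (0 :: pvAccumulate 0 (pizza ++ pizza)) i 0) 0 (· + 1)) case)
      PySem.Dict.empty := by
  apply PySem.List.foldl_congr_mem
  intro case i hi
  rw [PySem.List.mem_pyRange_one] at hi
  rw [innerA_eq, ← keys_eq pizza i hi.1 hi.2, List.foldl_map]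

-- ===== VERDICT (by name: the statement is the Claim_ definition above) =====
theorem findPizza_spec : Claim_equal_findPizza := by
  intro pizza _
  unfold Spec_findPizza findPizza findPizza_alt
  simp only []
  rw [cases_eq]
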